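-- pv_equiv track=rewrite | github.com/DominicKlukas/NumericalAnalysis | main.py | reverse_sequentially_arriving_customer_types
-- ===== SOURCE A (Python) =====
-- def reverse_sequentially_arriving_customer_types(customer_list, seed, T):
--     num_customers = len(customer_list)
--     segment_length = int(T / num_customers)
--     final_segment = T - segment_length*(num_customers-1)
--     arriving_customer_types = []
--     for i in range(num_customers - 1):
--         arriving_customer_types += [customer_list[num_customers - i - 1]]*segment_length
--     arriving_customer_types += [customer_list[0]]*final_segment
--     return arriving_customer_types
-- ===== SOURCE B (Python) =====
-- def reverse_sequentially_arriving_customer_types(customer_list, seed, T):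
--     num_customers = len(customer_list)
--     segment_length = int(T / num_customers)
--     if segment_length <= 0:
--         return [customer_list[0]] * T
--     return [customer_list[num_customers - 1 - min(t // segment_length, num_customers - 1)]
--             for t in range(T)]
-- ===== Notes on version B (the rewrite author's own statement) =====
-- stated objective: alternative
-- what changed: B replaces A's block-by-block construction (one replicated, concatenated segment per customer, plus a separately computed final segment) by a single element-wise pass over range(T) with a closed-form capped index formula customer_list[n-1-min(t//segment_length, n-1)], special-casing segment_length<=0 as one replicated block.
import Mathlib
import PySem

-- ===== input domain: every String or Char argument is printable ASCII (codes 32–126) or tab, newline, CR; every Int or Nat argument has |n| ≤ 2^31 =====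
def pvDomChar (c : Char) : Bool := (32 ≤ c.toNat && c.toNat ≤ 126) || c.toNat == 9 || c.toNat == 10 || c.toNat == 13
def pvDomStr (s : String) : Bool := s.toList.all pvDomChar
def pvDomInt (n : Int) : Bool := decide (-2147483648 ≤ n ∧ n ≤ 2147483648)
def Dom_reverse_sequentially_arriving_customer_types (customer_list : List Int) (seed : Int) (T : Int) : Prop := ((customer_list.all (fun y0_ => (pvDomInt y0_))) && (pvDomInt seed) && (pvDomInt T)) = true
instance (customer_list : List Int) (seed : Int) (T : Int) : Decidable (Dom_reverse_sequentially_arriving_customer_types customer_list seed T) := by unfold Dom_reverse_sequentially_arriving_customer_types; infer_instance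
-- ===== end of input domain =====

-- B replaces A's block-by-block construction (concatenating one replicated segment per
-- customer) by a single element-wise pass: a closed-form index formula per time step.
-- Objective: alternative decomposition, same asymptotic cost.

-- ===== PORT A =====
-- int(T / num_customers) in Python is float division then truncation toward zero; on the
-- domain |T| ≤ 2^31 this is exactly the truncated integer quotient, ported as Int.tdiv.
def reverse_sequentially_arriving_customer_types (customer_list : List Int) (seed : Int) (T : Int) : List Int :=
  let num_customers : Int := customer_list.length
  let segment_length : Int := T.tdiv num_customers
  let final_segment : Int := T - segment_length * (num_customers - 1)
  let body := (PySem.List.pyRange 0 (num_customers - 1) 1).foldl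
    (fun acc i => acc ++ PySem.List.pyRepeat [PySem.List.pyGetD customer_list (num_customers - i - 1) 0] segment_length) []
  body ++ PySem.List.pyRepeat [PySem.List.pyGetD customer_list 0 0] final_segment

-- ===== PORT B =====
def reverse_sequentially_arriving_customer_types_alt (customer_list : List Int) (seed : Int) (T : Int) : List Int :=
  let num_customers : Int := customer_list.length
  let segment_length : Int := T.tdiv num_customers
  if segment_length ≤ 0 then
    PySem.List.pyRepeat [PySem.List.pyGetD customer_list 0 0] T
  else
    (PySem.List.pyRange 0 T 1).map (fun t =>
      PySem.List.pyGetD customer_list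
        (num_customers - 1 - min (PySem.Int.floordiv t segment_length) (num_customers - 1)) 0)

-- ===== PRECONDITION & SPEC =====
-- Pre_ excludes only the empty customer_list, on which Python A raises ZeroDivisionError.
def Pre_reverse_sequentially_arriving_customer_types (customer_list : List Int) (seed : Int) (T : Int) : Prop :=
  customer_list ≠ []
instance (customer_list : List Int) (seed : Int) (T : Int) : Decidable (Pre_reverse_sequentially_arriving_customer_types customer_list seed T) := by unfold Pre_reverse_sequentially_arriving_customer_types; infer_instance

def pvWitness_reverse_sequentially_arriving_customer_types : List Int × Int × Int := ([1, 2, 3], 0, 7)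

def Spec_reverse_sequentially_arriving_customer_types (customer_list : List Int) (seed : Int) (T : Int) (out : List Int) : Prop := out = reverse_sequentially_arriving_customer_types_alt customer_list seed T
instance (customer_list : List Int) (seed : Int) (T : Int) (out : List Int) : Decidable (Spec_reverse_sequentially_arriving_customer_types customer_list seed T out) := by unfold Spec_reverse_sequentially_arriving_customer_types; infer_instance

-- ===== CLAIM (what is proved, stated in full; the proofs are below) =====
def Claim_equal_reverse_sequentially_arriving_customer_types : Prop := ∀ (customer_list : List Int) (seed : Int) (T : Int), Dom_reverse_sequentially_arriving_customer_types customer_list seed T → Pre_reverse_sequentially_arriving_customer_types customer_list seed T → Spec_reverse_sequentially_arriving_customer_types customer_list seed T (reverse_sequentially_arriving_customer_types customer_list seed T)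

-- ===== LEMMAS AND PROOFS =====

-- Block decomposition: mapping t ↦ g (t / s) over range (k*s) yields k blocks of length s.
theorem pv_blocks (g : Nat → Int) (s : Nat) (hs : 0 < s) :
    ∀ (k : Nat), (List.range (k * s)).map (fun t => g (t / s))
      = (List.range k).flatMap (fun i => List.replicate s (g i)) := by
  intro k
  induction k with
  | zero => simp
  | succ k ih =>
    have h1 : (k + 1) * s = k * s + s := by ring
    rw [h1, List.range_add, List.map_append, ih, List.range_succ, List.flatMap_append,
      List.map_map]
    have h2 : ∀ j ∈ List.range s,
        ((fun t => g (t / s)) ∘ fun a => k * s + a) j = (fun _ : Nat => g k) j := by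
      intro j hj
      have hj' : j < s := List.mem_range.mp hj
      have hj0 : j / s = 0 := Nat.div_eq_of_lt hj'
      have : (k * s + j) / s = k := by
        rw [Nat.mul_comm k s, Nat.mul_add_div hs, hj0]
        omega
      simp [this]
    rw [List.map_congr_left h2]
    simp [List.map_const']

-- ===== VERDICT (by name: the statement is the Claim_ definition above) =====
theorem reverse_sequentially_arriving_customer_types_spec : Claim_equal_reverse_sequentially_arriving_customer_types := by
  intro cl seed T _hdom hpre
  unfold Spec_reverse_sequentially_arriving_customer_types
  unfold reverse_sequentially_arriving_customer_types reverse_sequentially_arriving_customer_types_alt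
  simp only []
  set N : Nat := cl.length with hNdef
  have hN : 1 ≤ N := by
    cases cl with
    | nil => exact absurd rfl hpre
    | cons a l => simp [hNdef]
  set seg : Int := T.tdiv (N : Int) with hseg
  by_cases hle : seg ≤ 0
  · -- all per-customer blocks are empty; both sides are a single replicated block
    rw [if_pos hle]
    rw [PySem.List.foldl_append_eq_flatMap]
    have hempty : ∀ i : Int, PySem.List.pyRepeat [PySem.List.pyGetD cl ((N : Int) - i - 1) 0] seg = [] := by
      intro i
      rw [PySem.List.pyRepeat_singleton]
      have : seg.toNat = 0 := Int.toNat_of_nonpos hle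
      simp [this]
    have hflat : (PySem.List.pyRange 0 ((N : Int) - 1) 1).flatMap
        (fun i => PySem.List.pyRepeat [PySem.List.pyGetD cl ((N : Int) - i - 1) 0] seg) = [] := by
      apply List.flatMap_eq_nil_iff.mpr
      intro i _
      exact hempty i
    rw [hflat]
    simp only [List.nil_append]
    -- remains: replicate (T - seg*(N-1)).toNat x = replicate T.toNat x
    rw [PySem.List.pyRepeat_singleton, PySem.List.pyRepeat_singleton]
    congr 1
    by_cases hT : 0 ≤ T
    · have h0 : 0 ≤ seg := by
        rw [hseg]; exact Int.tdiv_nonneg hT (by exact_mod_cast Nat.zero_le N)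
      have : seg = 0 := le_antisymm hle h0
      rw [this]; ring_nf
    · -- T < 0 : both sides clamp to 0
      push_neg at hT
      have hrw : seg = -((-T) / (N : Int)) := by
        rw [hseg, ← Int.tdiv_eq_ediv_of_nonneg (show (0:Int) ≤ -T by omega), Int.neg_tdiv]
        omega
      set p : Int := (-T) / (N : Int) with hp
      have hp0 : 0 ≤ p := Int.ediv_nonneg (by omega) (by exact_mod_cast Nat.zero_le N)
      have hpN : p * (N : Int) ≤ -T := Int.ediv_mul_le (-T) (by positivity)
      have h1 : T - seg * ((N : Int) - 1) ≤ 0 := by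
        rw [hrw]
        have hNcast : (1 : Int) ≤ (N : Int) := by exact_mod_cast hN
        nlinarith
      rw [Int.toNat_of_nonpos h1, Int.toNat_of_nonpos (by omega)]
  · -- segment_length > 0
    push_neg at hle
    rw [if_neg (by omega)]
    have hT : 0 < T := by
      by_contra hT
      push_neg at hT
      have : seg ≤ 0 := by
        rw [hseg, ← Int.neg_neg T, Int.neg_tdiv]
        have : 0 ≤ (-T).tdiv (N : Int) :=
          Int.tdiv_nonneg (by omega) (by exact_mod_cast Nat.zero_le N)
        omega
      omega
    have hsegediv : seg = T / (N : Int) := by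
      rw [hseg, Int.tdiv_eq_ediv_of_nonneg (by omega)]
    obtain ⟨s, hs⟩ : ∃ s : Nat, seg = (s : Int) := ⟨seg.toNat, (Int.toNat_of_nonneg (by omega)).symm⟩
    obtain ⟨Tn, hTn⟩ : ∃ t : Nat, T = (t : Int) := ⟨T.toNat, (Int.toNat_of_nonneg (by omega)).symm⟩
    have hs0 : 0 < s := by exact_mod_cast hs ▸ hle
    -- final segment is nonnegative; get its Nat value F with Tn = (N-1)*s + F
    have hsegN : seg * (N : Int) ≤ T := by
      rw [hsegediv]; exact Int.ediv_mul_le T (by positivity)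
    have hfin0 : 0 ≤ T - seg * ((N : Int) - 1) := by nlinarith [hs ▸ hle]
    obtain ⟨F, hF⟩ : ∃ f : Nat, T - seg * ((N : Int) - 1) = (f : Int) :=
      ⟨(T - seg * ((N : Int) - 1)).toNat, (Int.toNat_of_nonneg hfin0).symm⟩
    have hTF : Tn = (N - 1) * s + F := by
      have hNcast : (1 : Int) ≤ (N : Int) := by exact_mod_cast hN
      have : (Tn : Int) = ((N : Int) - 1) * (s : Int) + (F : Int) := by
        rw [← hTn, ← hs, ← hF]; ring
      have hcast : ((N : Int) - 1) = ((N - 1 : Nat) : Int) := by omega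
      rw [hcast] at this
      exact_mod_cast this
    -- rewrite A's side to Nat-level flatMap over blocks
    rw [PySem.List.foldl_append_eq_flatMap, List.nil_append]
    have hrangeA : PySem.List.pyRange 0 ((N : Int) - 1) 1
        = (List.range (N - 1)).map (fun k : Nat => (k : Int)) := by
      rw [show ((N : Int) - 1) = ((N - 1 : Nat) : Int) by omega]
      exact PySem.List.pyRange_zero_natCast _
    rw [hrangeA, List.flatMap_map]
    have hblockA : ∀ k ∈ List.range (N - 1),
        PySem.List.pyRepeat [PySem.List.pyGetD cl ((N : Int) - (k : Int) - 1) 0] seg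
          = List.replicate s (cl.getD (N - 1 - k) 0) := by
      intro k hk
      have hk' : k < N - 1 := List.mem_range.mp hk
      rw [PySem.List.pyRepeat_singleton]
      have h1 : seg.toNat = s := by rw [hs]; exact Int.toNat_natCast s
      have h2 : (N : Int) - (k : Int) - 1 = ((N - 1 - k : Nat) : Int) := by omega
      rw [h1, h2, PySem.List.pyGetD_natCast]
    have hblockA' : ∀ k ∈ List.range (N - 1),
        (fun a : Nat => PySem.List.pyRepeat [PySem.List.pyGetD cl ((N : Int) - (a : Int) - 1) 0] seg) k
          = (fun a : Nat => List.replicate s (cl.getD (N - 1 - a) 0)) k := fun k hk => hblockA k hk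
    rw [List.flatMap_congr hblockA']
    -- rewrite B's side to a Nat-level map over range Tn
    have hrangeB : PySem.List.pyRange 0 T 1 = (List.range Tn).map (fun k : Nat => (k : Int)) := by
      rw [hTn]
      exact PySem.List.pyRange_zero_natCast _
    rw [hrangeB, List.map_map]
    have hptB : ∀ t ∈ List.range Tn,
        PySem.List.pyGetD cl ((N : Int) - 1 - min (PySem.Int.floordiv (t : Int) seg) ((N : Int) - 1)) 0
          = cl.getD (N - 1 - min (t / s) (N - 1)) 0 := by
      intro t _
      have hfd : PySem.Int.floordiv (t : Int) seg = ((t / s : Nat) : Int) := by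
        unfold PySem.Int.floordiv
        rw [hs]
        have hfd1 : ((t : Int)).fdiv ((s : Int)) = (t : Int) / (s : Int) := by
          apply Int.fdiv_eq_ediv_of_nonneg
          positivity
        rw [hfd1]
        exact_mod_cast rfl
      have hmin : min (((t / s : Nat) : Int)) ((N : Int) - 1) = ((min (t / s) (N - 1) : Nat) : Int) := by
        have h1 : ((N : Int) - 1) = ((N - 1 : Nat) : Int) := by omega
        rw [h1, Nat.cast_min]
      have hidx : (N : Int) - 1 - ((min (t / s) (N - 1) : Nat) : Int) = ((N - 1 - min (t / s) (N - 1) : Nat) : Int) := by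
        have : min (t / s) (N - 1) ≤ N - 1 := Nat.min_le_right _ _
        omega
      rw [hfd, hmin, hidx, PySem.List.pyGetD_natCast]
    have hmapB : (List.range Tn).map ((fun t =>
          PySem.List.pyGetD cl ((N : Int) - 1 - min (PySem.Int.floordiv t seg) ((N : Int) - 1)) 0) ∘ (fun k : Nat => (k : Int)))
        = (List.range Tn).map (fun t => cl.getD (N - 1 - min (t / s) (N - 1)) 0) :=
      List.map_congr_left (fun t ht => hptB t ht)
    rw [hmapB]
    -- final-segment block of A in Nat form
    have hfinblock : PySem.List.pyRepeat [PySem.List.pyGetD cl 0 0] (T - seg * ((N : Int) - 1))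
        = List.replicate F (cl.getD 0 0) := by
      rw [PySem.List.pyRepeat_singleton, hF, Int.toNat_natCast, PySem.List.pyGetD_zero]
    rw [hfinblock]
    -- pure Nat goal
    rw [hTF, List.range_add, List.map_append]
    set f : Nat → Int := fun i => cl.getD (N - 1 - i) 0 with hf
    congr 1
    · -- first (N-1) full blocks
      rw [pv_blocks (fun q => f (min q (N - 1))) s hs0 (N - 1)]
      apply List.flatMap_congr
      intro i hi
      have : i < N - 1 := List.mem_range.mp hi
      have hmin : min i (N - 1) = i := Nat.min_eq_left (by omega)
      simp [hmin, hf, List.getD]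
    · -- the final, possibly longer block maps to customer 0
      rw [List.map_map]
      have hconst : ∀ j ∈ List.range F,
          ((fun t => cl.getD (N - 1 - min (t / s) (N - 1)) 0) ∘ fun x => (N - 1) * s + x) j
            = (fun _ : Nat => cl.getD 0 0) j := by
        intro j _
        simp only [Function.comp_apply]
        have hdiv : ((N - 1) * s + j) / s = (N - 1) + j / s := by
          rw [Nat.mul_comm (N-1) s, Nat.mul_add_div hs0]
        have hge : N - 1 ≤ ((N - 1) * s + j) / s := hdiv ▸ Nat.le_add_right (N - 1) (j / s)
        have hmin : min (((N - 1) * s + j) / s) (N - 1) = N - 1 := Nat.min_eq_right hge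
        rw [hmin]
        simp
      rw [List.map_congr_left hconst]
      simp [List.map_const']
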